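-- pv_equiv track=rewrite | github.com/JJ-Meng/CAPAssess | CapFuzzer/3_parse.py | delete_multi_brackets
-- ===== SOURCE A (Python) =====
-- def delete_multi_brackets(s):
-- 	if "[ " in s:
-- 		s=s.replace("[ ","[")
-- 	if "] " in s:
-- 		s=s.replace(" ]","]")
-- 	stack = []
-- 	out_res = ''
-- 	for c in s:
-- 		if c == '[':
-- 			stack.append('[')
-- 		elif c == ']':
-- 			if len(stack) == 1:
-- 				top_stack = stack.pop()
-- 				if top_stack[0] == '[':
-- 					top_stack += ']'
-- 				out_res += top_stack
-- 			elif len(stack) > 1: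
-- 				stack.pop()
-- 			else:
-- 				pass
-- 		elif not stack:
-- 			out_res += c
-- 		elif len(stack) == 1:
-- 			stack[-1] += c
-- 		elif len(stack)>1:
-- 			tmptop=stack.pop()+c
-- 			stack.append(tmptop)
-- 	return out_res
-- ===== SOURCE B (Python) =====
-- def delete_multi_brackets(s):
--     if "[ " in s:
--         s = s.replace("[ ", "[")
--     if "] " in s:
--         s = s.replace(" ]", "]")
--     out = []
--     i, n = 0, len(s)
--     while i < n:
--         c = s[i]
--         if c == '[':
--             grp, i = _group(s, i + 1)
--             if grp is None:          # unmatched '[': the rest of the string vanishes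
--                 break
--             out.append(grp)
--         else:
--             if c != ']':             # stray ']' at depth 0 is dropped
--                 out.append(c)
--             i += 1
--     return ''.join(out)
--
--
-- def _group(s, i):
--     """Collect a top-level group's own text starting at index i; nested groups are
--     jumped over wholesale.  Returns (group text, index after its ']'), or (None, _)."""
--     body = []
--     n = len(s)
--     while i < n:
--         c = s[i]
--         if c == ']':
--             return '[' + ''.join(body) + ']', i + 1
--         if c == '[':
--             j = _skip(s, i + 1)
--             if j is None:
--                 return None, n
--             i = j
--         else:
--             body.append(c)
--             i += 1
--     return None, n
--
--
-- def _skip(s, i):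
--     """Index just past the ']' matching the '[' before position i, or None."""
--     depth = 1
--     n = len(s)
--     while i < n:
--         c = s[i]
--         i += 1
--         if c == ']':
--             depth -= 1
--             if depth == 0:
--                 return i
--         elif c == '[':
--             depth += 1
--     return None
-- ===== Notes on version B (the rewrite author's own statement) =====
-- stated objective: alternative
-- what changed: Replaces A's uniform single-pass fold over a stack of growing strings with a staged index-jumping scan: an outer loop emits depth-0 text, a group collector gathers only the current top-level bracket's own text, and a skipper jumps over each nested group wholesale; pieces are joined at the end instead of repeated string-accumulator appends.
import Mathlib
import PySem

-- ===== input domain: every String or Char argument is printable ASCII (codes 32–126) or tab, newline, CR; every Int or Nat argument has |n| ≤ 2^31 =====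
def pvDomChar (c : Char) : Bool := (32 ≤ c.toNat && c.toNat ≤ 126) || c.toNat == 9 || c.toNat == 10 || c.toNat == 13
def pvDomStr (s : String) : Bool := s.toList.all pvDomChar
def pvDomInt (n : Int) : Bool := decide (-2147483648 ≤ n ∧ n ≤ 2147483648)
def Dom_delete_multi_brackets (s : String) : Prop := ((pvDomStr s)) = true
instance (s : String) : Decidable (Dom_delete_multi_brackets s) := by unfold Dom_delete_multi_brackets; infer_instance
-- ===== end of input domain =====

-- B replaces A's single-pass fold over a stack of strings by a recursive descent
-- (depth-0 emitter / group collector / nested-group skipper); alternative, same cost.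

-- ===== PORT A =====
-- one step of A's loop; Python strings are carried as List Char,
-- the stack is head-first (head = Python stack[-1], last = stack[0])
def dmbStepA (st : List (List Char) × List Char) (c : Char) : List (List Char) × List Char :=
  if c = '[' then (['['] :: st.1, st.2)
  else if c = ']' then
    match st.1 with
    | [] => st                                 -- pass
    | [top] => ([], st.2 ++ (if top.head? = some '[' then top ++ [']'] else top))
    | _ :: rest => (rest, st.2)                -- len(stack) > 1: pop, discard
  else
    match st.1 with
    | [] => (st.1, st.2 ++ [c])
    | [top] => ([top ++ [c]], st.2)            -- stack[-1] += c
    | top :: rest => ((top ++ [c]) :: rest, st.2)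

def delete_multi_brackets (s : String) : String :=
  let s1 := if PySem.Str.isIn "[ " s then PySem.Str.replace s "[ " "[" else s
  let s2 := if PySem.Str.isIn "] " s1 then PySem.Str.replace s1 " ]" "]" else s1
  String.ofList (s2.toList.foldl dmbStepA ([], [])).2

-- ===== PORT B =====
-- _skip: Source B's index-jump loop as structural recursion on the character suffix;
-- result = suffix just past the ']' matching the already-open bracket(s), or none
def dmbSkip : List Char → Nat → Option (List Char)
  | [], _ => none
  | c :: rest, d =>
    if c = ']' then (if d = 1 then some rest else dmbSkip rest (d - 1))
    else if c = '[' then dmbSkip rest (d + 1)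
    else dmbSkip rest d

-- dmbSkip only returns strict suffixes (needed for dmbGroup's termination)
theorem dmbSkip_length : ∀ (l : List Char) (d : Nat) (r : List Char),
    dmbSkip l d = some r → r.length < l.length := by
  intro l
  induction l with
  | nil => intro d r h; simp [dmbSkip] at h
  | cons c rest ih =>
    intro d r h
    simp only [dmbSkip] at h
    split_ifs at h with h1 h2 h3
    · simp at h; subst h; simp
    · exact Nat.lt_trans (ih _ _ h) (by simp)
    · exact Nat.lt_trans (ih _ _ h) (by simp)
    · exact Nat.lt_trans (ih _ _ h) (by simp)

mutual
-- _outside: Source B's outer while-loop (depth-0 emitter); the loop's resumption after a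
-- group is the tail call inside dmbGroup
def dmbOutside : List Char → List Char
  | [] => []
  | c :: rest =>
    if c = '[' then dmbGroup rest []
    else if c = ']' then dmbOutside rest
    else c :: dmbOutside rest
  termination_by l => l.length
  decreasing_by
    · simp
    · simp
    · simp

-- _group: Source B's group collector; nested groups are jumped over via dmbSkip
def dmbGroup : List Char → List Char → List Char
  | [], _ => []
  | c :: rest, body =>
    if c = ']' then '[' :: body ++ ']' :: dmbOutside rest
    else if c = '[' then
      match h : dmbSkip rest 1 with
      | some r => dmbGroup r body
      | none => []
    else dmbGroup rest (body ++ [c])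
  termination_by l _ => l.length
  decreasing_by
    · simp
    · exact Nat.lt_trans (dmbSkip_length _ _ _ h) (by simp)
    · simp
end

def delete_multi_brackets_alt (s : String) : String :=
  let s1 := if PySem.Str.isIn "[ " s then PySem.Str.replace s "[ " "[" else s
  let s2 := if PySem.Str.isIn "] " s1 then PySem.Str.replace s1 " ]" "]" else s1
  String.ofList (dmbOutside s2.toList)

-- ===== PRECONDITION & SPEC =====
def Spec_delete_multi_brackets (s : String) (out : String) : Prop := out = delete_multi_brackets_alt s
instance (s : String) (out : String) : Decidable (Spec_delete_multi_brackets s out) := by unfold Spec_delete_multi_brackets; infer_instance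

-- ===== CLAIM (what is proved, stated in full; the proofs are below) =====
def Claim_equal_delete_multi_brackets : Prop := ∀ (s : String), Dom_delete_multi_brackets s → Spec_delete_multi_brackets s (delete_multi_brackets s)

-- ===== LEMMAS AND PROOFS =====

-- unfolding lemmas for the mutual well-founded definitions
theorem dmbOutside_nil : dmbOutside [] = [] := by rw [dmbOutside]

theorem dmbOutside_cons (c : Char) (rest : List Char) :
    dmbOutside (c :: rest) =
      if c = '[' then dmbGroup rest []
      else if c = ']' then dmbOutside rest
      else c :: dmbOutside rest := by rw [dmbOutside]

theorem dmbGroup_nil (body : List Char) : dmbGroup [] body = [] := by rw [dmbGroup]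

theorem dmbGroup_cons (c : Char) (rest body : List Char) :
    dmbGroup (c :: rest) body =
      if c = ']' then '[' :: body ++ ']' :: dmbOutside rest
      else if c = '[' then
        match dmbSkip rest 1 with
        | some r => dmbGroup r body
        | none => []
      else dmbGroup rest (body ++ [c]) := by
  rw [dmbGroup]
  rcases hs : dmbSkip rest 1 with _ | r <;> simp [hs]

-- evaluation lemmas for one step of A's loop
theorem stepA_open (st : List (List Char)) (out : List Char) :
    dmbStepA (st, out) '[' = (['['] :: st, out) := by simp [dmbStepA]

theorem stepA_close_nil (out : List Char) :
    dmbStepA ([], out) ']' = ([], out) := by simp [dmbStepA]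

theorem stepA_close_one (top out : List Char) :
    dmbStepA ([top], out) ']' =
      ([], out ++ (if top.head? = some '[' then top ++ [']'] else top)) := by simp [dmbStepA]

theorem stepA_close_deep (t u : List Char) (rest : List (List Char)) (out : List Char) :
    dmbStepA (t :: u :: rest, out) ']' = (u :: rest, out) := by simp [dmbStepA]

theorem stepA_other_nil (c : Char) (out : List Char) (h1 : ¬c = '[') (h2 : ¬c = ']') :
    dmbStepA ([], out) c = ([], out ++ [c]) := by simp [dmbStepA, h1, h2]

theorem stepA_other_one (c : Char) (top out : List Char) (h1 : ¬c = '[') (h2 : ¬c = ']') :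
    dmbStepA ([top], out) c = ([top ++ [c]], out) := by simp [dmbStepA, h1, h2]

theorem stepA_other_deep (c : Char) (t u : List Char) (rest : List (List Char)) (out : List Char)
    (h1 : ¬c = '[') (h2 : ¬c = ']') :
    dmbStepA (t :: u :: rest, out) c = ((t ++ [c]) :: u :: rest, out) := by
  simp [dmbStepA, h1, h2]

-- While A's stack has ≥ 2 entries, everything is discarded until the bracket that
-- opened the extra entries closes — exactly B's dmbSkip.
theorem foldl_stepA_deep : ∀ (l : List Char) (u : List Char) (ex : List (List Char))
    (v : List Char) (vs : List (List Char)) (out : List Char),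
    (l.foldl dmbStepA ((u :: ex) ++ (v :: vs), out)).2 =
      (match dmbSkip l (ex.length + 1) with
       | none => out
       | some r => (r.foldl dmbStepA ((v :: vs), out)).2) := by
  intro l
  induction l with
  | nil => intro u ex v vs out; simp [dmbSkip]
  | cons c rest ih =>
    intro u ex v vs out
    by_cases h1 : c = '['
    · subst h1
      rw [List.foldl_cons, show ((u :: ex) ++ (v :: vs), out) = ((u :: (ex ++ (v :: vs))), out) by simp,
        stepA_open, show (['['] :: u :: (ex ++ v :: vs)) = (('[' :: []) :: (u :: ex)) ++ (v :: vs) by simp]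
      rw [ih]
      simp [dmbSkip]
    · by_cases h2 : c = ']'
      · subst h2
        cases ex with
        | nil =>
          rw [List.foldl_cons]
          simp only [List.nil_append, List.singleton_append]
          rw [stepA_close_deep]
          simp [dmbSkip]
        | cons e es =>
          rw [List.foldl_cons]
          simp only [List.cons_append]
          rw [stepA_close_deep, show (e :: (es ++ v :: vs)) = (e :: es) ++ (v :: vs) from rfl, ih]
          have hne : ¬(es.length + 1 + 1 = 1) := by omega
          have hsub : es.length + 1 + 1 - 1 = es.length + 1 := by omega
          simp [dmbSkip, hne, hsub]
      · rw [List.foldl_cons, show ((u :: ex) ++ (v :: vs), out) = (u :: (ex ++ v :: vs), out) by simp]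
        cases hx : ex ++ v :: vs with
        | nil => simp at hx
        | cons w ws =>
          rw [stepA_other_deep c u w ws out h1 h2, show ((u ++ [c]) :: w :: ws) = ((u ++ [c]) :: ex) ++ (v :: vs) by simp [hx]]
          rw [ih]
          simp [dmbSkip, h1, h2]

-- Joint characterisation of A's fold by B's two mutually recursive functions.
theorem foldl_stepA_main : ∀ (n : Nat) (l : List Char), l.length ≤ n →
    (∀ out : List Char, (l.foldl dmbStepA ([], out)).2 = out ++ dmbOutside l) ∧
    (∀ (body out : List Char),
      (l.foldl dmbStepA ([('[' :: body)], out)).2 = out ++ dmbGroup l body) := by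
  intro n
  induction n with
  | zero =>
    intro l hl
    have : l = [] := List.eq_nil_of_length_eq_zero (Nat.le_zero.mp hl)
    subst this
    simp [dmbOutside_nil, dmbGroup_nil]
  | succ n ih =>
    intro l hl
    cases l with
    | nil => simp [dmbOutside_nil, dmbGroup_nil]
    | cons c rest =>
      have hr : rest.length ≤ n := by simpa using Nat.succ_le_succ_iff.mp hl
      constructor
      · intro out
        rw [dmbOutside_cons]
        by_cases h1 : c = '['
        · subst h1
          rw [List.foldl_cons, stepA_open, if_pos rfl]
          exact (ih rest hr).2 [] out
        · by_cases h2 : c = ']'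
          · subst h2
            rw [List.foldl_cons, stepA_close_nil, if_neg (by decide), if_pos rfl]
            exact (ih rest hr).1 out
          · rw [List.foldl_cons, stepA_other_nil c out h1 h2, if_neg h1, if_neg h2]
            rw [(ih rest hr).1 (out ++ [c])]
            simp
      · intro body out
        rw [dmbGroup_cons]
        by_cases h2 : c = ']'
        · subst h2
          rw [List.foldl_cons, stepA_close_one, if_pos rfl]
          rw [(ih rest hr).1]
          simp
        · by_cases h1 : c = '['
          · subst h1
            rw [List.foldl_cons, stepA_open, if_neg (by decide), if_pos rfl]
            have hdeep := foldl_stepA_deep rest ['['] [] ('[' :: body) [] out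
            simp only [List.length_nil, Nat.zero_add, List.singleton_append] at hdeep
            rw [hdeep]
            cases hs : dmbSkip rest 1 with
            | none => simp
            | some r =>
              have hrlen : r.length ≤ n :=
                Nat.le_of_lt (Nat.lt_of_lt_of_le (dmbSkip_length rest 1 r hs) hr)
              exact (ih r hrlen).2 body out
          · rw [List.foldl_cons, stepA_other_one c _ out h1 h2, if_neg h2, if_neg h1]
            exact (ih rest hr).2 (body ++ [c]) out

theorem foldl_stepA_outside (l : List Char) :
    (l.foldl dmbStepA ([], [])).2 = dmbOutside l := by
  simpa using (foldl_stepA_main l.length l (Nat.le_refl _)).1 []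

-- ===== VERDICT (by name: the statement is the Claim_ definition above) =====
theorem delete_multi_brackets_spec : Claim_equal_delete_multi_brackets := by
  intro s _
  unfold Spec_delete_multi_brackets delete_multi_brackets delete_multi_brackets_alt
  simp only [foldl_stepA_outside]
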